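-- pv_equiv track=rewrite | github.com/anjilarora/PJTL-RYW-Dashboard | scripts/build_phase1_canonical_base.py | infer_module
-- ===== SOURCE A (Python) =====
-- def infer_module(table_name: str, field_name: str) -> str:
--     if table_name in {"vehicle_day_base", "driver_active_time_base"}:
--         return "module_3_capacity_and_scheduling"
--     if table_name in {"weekly_margin_base", "securecare_profit_base"}:
--         if any(token in field_name for token in ["revenue", "margin", "profit"]):
--             return "module_5_revenue_and_margin"
--         if any(token in field_name for token in ["cost", "gas", "wage", "overhead", "capx"]):
--             return "module_4_cost"
--         return "cross_cutting"
--     if table_name == "prospective_intake_base":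
--         if any(token in field_name for token in ["price", "billing", "payer", "billable", "contract"]):
--             return "module_2_contract_business_model"
--         return "module_1_demand"
--     if table_name in {"payer_summary_base"}:
--         return "module_2_contract_business_model"
--     if table_name in {"mode_summary_base"}:
--         return "module_5_revenue_and_margin"
--     if table_name in {"contract_volume_base", "mode_breakdown_base"}:
--         if any(token in field_name for token in ["price", "kent_legs"]):
--             return "cross_cutting"
--         if field_name in {"payer_id", "order_status", "reason"}:
--             return "module_2_contract_business_model"
--         if field_name in {"date_of_service", "date_of_service_iso", "pick_up_time", "pick_up_time_iso", "day", "week"}: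
--             return "module_3_capacity_and_scheduling"
--         return "cross_cutting"
--     return "cross_cutting"
-- ===== SOURCE B (Python) =====
-- # Data-driven rules table: each table maps to a constant result or (rules, default),
-- # rules applied in order; "sub" = any token is a substring, "exact" = field equals a token.
-- RULES = {
--     "vehicle_day_base": "module_3_capacity_and_scheduling",
--     "driver_active_time_base": "module_3_capacity_and_scheduling",
--     "weekly_margin_base": (
--         [("sub", ["revenue", "margin", "profit"], "module_5_revenue_and_margin"),
--          ("sub", ["cost", "gas", "wage", "overhead", "capx"], "module_4_cost")],
--         "cross_cutting"),
--     "securecare_profit_base": (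
--         [("sub", ["revenue", "margin", "profit"], "module_5_revenue_and_margin"),
--          ("sub", ["cost", "gas", "wage", "overhead", "capx"], "module_4_cost")],
--         "cross_cutting"),
--     "prospective_intake_base": (
--         [("sub", ["price", "billing", "payer", "billable", "contract"],
--           "module_2_contract_business_model")],
--         "module_1_demand"),
--     "payer_summary_base": "module_2_contract_business_model",
--     "mode_summary_base": "module_5_revenue_and_margin",
--     "contract_volume_base": (
--         [("sub", ["price", "kent_legs"], "cross_cutting"),
--          ("exact", ["payer_id", "order_status", "reason"],
--           "module_2_contract_business_model"),
--          ("exact", ["date_of_service", "date_of_service_iso", "pick_up_time",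
--                     "pick_up_time_iso", "day", "week"],
--           "module_3_capacity_and_scheduling")],
--         "cross_cutting"),
--     "mode_breakdown_base": (
--         [("sub", ["price", "kent_legs"], "cross_cutting"),
--          ("exact", ["payer_id", "order_status", "reason"],
--           "module_2_contract_business_model"),
--          ("exact", ["date_of_service", "date_of_service_iso", "pick_up_time",
--                     "pick_up_time_iso", "day", "week"],
--           "module_3_capacity_and_scheduling")],
--         "cross_cutting"),
-- }
--
--
-- def infer_module(table_name: str, field_name: str) -> str:
--     entry = RULES.get(table_name)
--     if entry is None:
--         return "cross_cutting"
--     if isinstance(entry, str):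
--         return entry
--     rules, default = entry
--     for kind, tokens, result in rules:
--         if kind == "sub":
--             if any(t in field_name for t in tokens):
--                 return result
--         elif field_name in tokens:
--             return result
--     return default
-- ===== Notes on version B (the rewrite author's own statement) =====
-- stated objective: alternative
-- what changed: Replaces A's hard-coded if/elif ladder by a data-driven rules table (dict mapping each table to a constant or an ordered list of substring/exact rules plus a default) interpreted by one generic loop.
import Mathlib
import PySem

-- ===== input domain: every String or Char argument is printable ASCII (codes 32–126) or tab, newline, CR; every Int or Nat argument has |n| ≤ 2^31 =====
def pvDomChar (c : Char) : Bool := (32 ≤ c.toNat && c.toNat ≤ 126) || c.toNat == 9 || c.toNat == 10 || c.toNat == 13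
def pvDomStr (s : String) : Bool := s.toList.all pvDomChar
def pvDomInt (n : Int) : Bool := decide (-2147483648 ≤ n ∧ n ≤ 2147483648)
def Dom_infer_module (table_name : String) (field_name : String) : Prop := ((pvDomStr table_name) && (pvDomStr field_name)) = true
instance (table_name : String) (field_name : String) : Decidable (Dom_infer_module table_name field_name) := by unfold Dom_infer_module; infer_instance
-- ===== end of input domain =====

-- B replaces A's hard-coded if/elif ladder by one generic interpreter over a data-driven rules table (objective: data-structure-driven alternative).

-- ===== PORT A =====
def infer_module (table_name : String) (field_name : String) : String :=
  if table_name == "vehicle_day_base" || table_name == "driver_active_time_base" then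
    "module_3_capacity_and_scheduling"
  else if table_name == "weekly_margin_base" || table_name == "securecare_profit_base" then
    if ["revenue", "margin", "profit"].any (fun token => PySem.Str.isIn token field_name) then
      "module_5_revenue_and_margin"
    else if ["cost", "gas", "wage", "overhead", "capx"].any (fun token => PySem.Str.isIn token field_name) then
      "module_4_cost"
    else "cross_cutting"
  else if table_name == "prospective_intake_base" then
    if ["price", "billing", "payer", "billable", "contract"].any (fun token => PySem.Str.isIn token field_name) then
      "module_2_contract_business_model"
    else "module_1_demand"
  else if table_name == "payer_summary_base" then
    "module_2_contract_business_model"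
  else if table_name == "mode_summary_base" then
    "module_5_revenue_and_margin"
  else if table_name == "contract_volume_base" || table_name == "mode_breakdown_base" then
    if ["price", "kent_legs"].any (fun token => PySem.Str.isIn token field_name) then
      "cross_cutting"
    else if field_name == "payer_id" || field_name == "order_status" || field_name == "reason" then
      "module_2_contract_business_model"
    else if field_name == "date_of_service" || field_name == "date_of_service_iso" ||
            field_name == "pick_up_time" || field_name == "pick_up_time_iso" ||
            field_name == "day" || field_name == "week" then
      "module_3_capacity_and_scheduling"
    else "cross_cutting"
  else "cross_cutting"

-- ===== PORT B =====
inductive PVRule where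
  | sub : List String → String → PVRule
  | exact : List String → String → PVRule
deriving DecidableEq, Repr

-- the (kind, tokens, result) rule triples of Source B as an inductive tag
def pvApplyRules (rules : List PVRule) (field_name : String) (dflt : String) : String :=
  match rules with
  | [] => dflt
  | PVRule.sub tokens result :: rest =>
      if tokens.any (fun t => PySem.Str.isIn t field_name) then result
      else pvApplyRules rest field_name dflt
  | PVRule.exact tokens result :: rest =>
      if tokens.any (fun t => field_name == t) then result
      else pvApplyRules rest field_name dflt

def pvMarginRules : List PVRule :=
  [PVRule.sub ["revenue", "margin", "profit"] "module_5_revenue_and_margin",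
   PVRule.sub ["cost", "gas", "wage", "overhead", "capx"] "module_4_cost"]

def pvVolumeRules : List PVRule :=
  [PVRule.sub ["price", "kent_legs"] "cross_cutting",
   PVRule.exact ["payer_id", "order_status", "reason"] "module_2_contract_business_model",
   PVRule.exact ["date_of_service", "date_of_service_iso", "pick_up_time",
                 "pick_up_time_iso", "day", "week"] "module_3_capacity_and_scheduling"]

def pvRulesTable : PySem.Dict String (String ⊕ (List PVRule × String)) :=
  PySem.Dict.ofList
    [("vehicle_day_base", Sum.inl "module_3_capacity_and_scheduling"),
     ("driver_active_time_base", Sum.inl "module_3_capacity_and_scheduling"),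
     ("weekly_margin_base", Sum.inr (pvMarginRules, "cross_cutting")),
     ("securecare_profit_base", Sum.inr (pvMarginRules, "cross_cutting")),
     ("prospective_intake_base",
       Sum.inr ([PVRule.sub ["price", "billing", "payer", "billable", "contract"]
                   "module_2_contract_business_model"], "module_1_demand")),
     ("payer_summary_base", Sum.inl "module_2_contract_business_model"),
     ("mode_summary_base", Sum.inl "module_5_revenue_and_margin"),
     ("contract_volume_base", Sum.inr (pvVolumeRules, "cross_cutting")),
     ("mode_breakdown_base", Sum.inr (pvVolumeRules, "cross_cutting"))]

def infer_module_alt (table_name : String) (field_name : String) : String :=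
  match pvRulesTable.get? table_name with
  | none => "cross_cutting"
  | some (Sum.inl result) => result
  | some (Sum.inr (rules, dflt)) => pvApplyRules rules field_name dflt

-- ===== PRECONDITION & SPEC =====
def Spec_infer_module (table_name : String) (field_name : String) (out : String) : Prop := out = infer_module_alt table_name field_name
instance (table_name : String) (field_name : String) (out : String) : Decidable (Spec_infer_module table_name field_name out) := by unfold Spec_infer_module; infer_instance

-- ===== CLAIM (what is proved, stated in full; the proofs are below) =====
def Claim_equal_infer_module : Prop := ∀ (table_name : String) (field_name : String), Dom_infer_module table_name field_name → Spec_infer_module table_name field_name (infer_module table_name field_name)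


-- ===== LEMMAS AND PROOFS =====
theorem pv_keys : pvRulesTable.keys = ["vehicle_day_base", "driver_active_time_base",
    "weekly_margin_base", "securecare_profit_base", "prospective_intake_base",
    "payer_summary_base", "mode_summary_base", "contract_volume_base", "mode_breakdown_base"] := by
  decide

theorem pv_get_none (t : String)
    (h : t ∉ (["vehicle_day_base", "driver_active_time_base", "weekly_margin_base",
      "securecare_profit_base", "prospective_intake_base", "payer_summary_base",
      "mode_summary_base", "contract_volume_base", "mode_breakdown_base"] : List String)) :
    pvRulesTable.get? t = none := by
  rw [PySem.Dict.get?_eq_none_iff_not_mem_keys, pv_keys]; exact h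

-- ===== VERDICT (by name: the statement is the Claim_ definition above) =====
theorem infer_module_spec : Claim_equal_infer_module := by
  intro t f _
  unfold Spec_infer_module infer_module infer_module_alt
  by_cases h1 : t = "vehicle_day_base"
  · subst h1; rfl
  by_cases h2 : t = "driver_active_time_base"
  · subst h2; rfl
  by_cases h3 : t = "weekly_margin_base"
  · subst h3
    simp [show pvRulesTable.get? "weekly_margin_base"
        = some (Sum.inr (pvMarginRules, "cross_cutting")) from rfl,
      pvApplyRules, pvMarginRules]
  by_cases h4 : t = "securecare_profit_base"
  · subst h4
    simp [show pvRulesTable.get? "securecare_profit_base"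
        = some (Sum.inr (pvMarginRules, "cross_cutting")) from rfl,
      pvApplyRules, pvMarginRules]
  by_cases h5 : t = "prospective_intake_base"
  · subst h5
    simp [show pvRulesTable.get? "prospective_intake_base"
        = some (Sum.inr ([PVRule.sub ["price", "billing", "payer", "billable", "contract"]
            "module_2_contract_business_model"], "module_1_demand")) from rfl,
      pvApplyRules]
  by_cases h6 : t = "payer_summary_base"
  · subst h6; rfl
  by_cases h7 : t = "mode_summary_base"
  · subst h7; rfl
  by_cases h8 : t = "contract_volume_base"
  · subst h8
    simp [show pvRulesTable.get? "contract_volume_base"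
        = some (Sum.inr (pvVolumeRules, "cross_cutting")) from rfl,
      pvApplyRules, pvVolumeRules, or_assoc]
  by_cases h9 : t = "mode_breakdown_base"
  · subst h9
    simp [show pvRulesTable.get? "mode_breakdown_base"
        = some (Sum.inr (pvVolumeRules, "cross_cutting")) from rfl,
      pvApplyRules, pvVolumeRules, or_assoc]
  · rw [pv_get_none t (by simp [h1, h2, h3, h4, h5, h6, h7, h8, h9])]
    simp [h1, h2, h3, h4, h5, h6, h7, h8, h9]
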